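-- pv_equiv track=rewrite | github.com/Magdoll/cDNA_Cupcake | cupcake2/tofu2/ice_pbdagcon2.py | restore_args_with_whitespace
-- ===== SOURCE A (Python) =====
-- def restore_args_with_whitespace(x):
--     """Restore args with whitespace, to support file paths with whitespace"""
--     y = []
--     for xi in x:
--         if len(y) == 0:
--             y.append(xi)
--         else:
--             if y[-1].endswith('\\'):
--                 y[-1] = y[-1][0:-1] + ' ' + xi
--             else:
--                 y.append(xi)
--     return y
-- ===== SOURCE B (Python) =====
-- def restore_args_with_whitespace(x):
--     """Restore args with whitespace, to support file paths with whitespace"""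
--     out = []
--     n = len(x)
--     i = 0
--     while i < n:
--         cur = x[i]
--         i += 1
--         while cur.endswith('\\') and i < n:
--             cur = cur[:-1] + ' ' + x[i]
--             i += 1
--         out.append(cur)
--     return out
-- ===== Notes on version B (the rewrite author's own statement) =====
-- stated objective: alternative
-- what changed: Replaces the flat scan that keeps mutating the last element of the growing output list with an index-driven outer loop that builds each merged group in a local accumulator via a nested continuation-absorbing loop, appending each finished group once.
import Mathlib
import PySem

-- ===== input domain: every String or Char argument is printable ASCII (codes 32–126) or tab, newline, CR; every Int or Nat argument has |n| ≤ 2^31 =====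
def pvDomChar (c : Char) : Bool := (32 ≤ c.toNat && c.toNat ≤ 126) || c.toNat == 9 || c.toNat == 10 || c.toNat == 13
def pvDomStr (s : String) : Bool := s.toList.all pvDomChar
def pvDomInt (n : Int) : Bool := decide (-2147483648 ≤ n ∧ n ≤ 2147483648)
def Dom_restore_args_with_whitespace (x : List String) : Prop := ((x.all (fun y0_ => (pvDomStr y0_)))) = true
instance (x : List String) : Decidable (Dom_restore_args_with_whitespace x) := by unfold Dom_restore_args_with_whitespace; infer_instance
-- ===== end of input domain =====

-- B replaces A's flat scan (which keeps rewriting y[-1]) by an index-style outer loop with a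
-- nested continuation-absorbing loop over a local group accumulator; objective: alternative decomposition.

-- ===== PORT A =====
def restore_args_with_whitespace (x : List String) : List String :=
  x.foldl (fun y xi =>
    if y.length = 0 then y ++ [xi]
    else if PySem.Str.endswith ((PySem.List.pyGet? y (-1)).getD "") "\\" then
      y.dropLast ++ [PySem.Str.slice ((PySem.List.pyGet? y (-1)).getD "") none (some (-1)) ++ " " ++ xi]
    else y ++ [xi]) []

-- ===== PORT B =====
-- inner while loop: absorb continuation tokens into `cur`; outer loop advances through the list
def restoreAltGo (cur : String) (rest : List String) : List String :=
  match rest with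
  | [] => [cur]
  | xi :: rest' =>
    if PySem.Str.endswith cur "\\" then
      restoreAltGo (PySem.Str.slice cur none (some (-1)) ++ " " ++ xi) rest'
    else cur :: restoreAltGo xi rest'

def restore_args_with_whitespace_alt (x : List String) : List String :=
  match x with
  | [] => []
  | x0 :: xs => restoreAltGo x0 xs

-- ===== PRECONDITION & SPEC =====
def Spec_restore_args_with_whitespace (x : List String) (out : List String) : Prop := out = restore_args_with_whitespace_alt x
instance (x : List String) (out : List String) : Decidable (Spec_restore_args_with_whitespace x out) := by unfold Spec_restore_args_with_whitespace; infer_instance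

-- ===== CLAIM (what is proved, stated in full; the proofs are below) =====
def Claim_equal_restore_args_with_whitespace : Prop := ∀ (x : List String), Dom_restore_args_with_whitespace x → Spec_restore_args_with_whitespace x (restore_args_with_whitespace x)

-- ===== LEMMAS AND PROOFS =====

theorem pyGet_concat_last {α : Type} (ys : List α) (c : α) :
    PySem.List.pyGet? (ys ++ [c]) (-1) = some c := by
  simp [PySem.List.pyGet?, PySem.List.pyIdx?]

theorem foldl_step_concat (l ys0 : List String) (cur : String) :
    List.foldl (fun y xi =>
      if y.length = 0 then y ++ [xi]
      else if PySem.Str.endswith ((PySem.List.pyGet? y (-1)).getD "") "\\" then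
        y.dropLast ++ [PySem.Str.slice ((PySem.List.pyGet? y (-1)).getD "") none (some (-1)) ++ " " ++ xi]
      else y ++ [xi]) (ys0 ++ [cur]) l
    = ys0 ++ restoreAltGo cur l := by
  induction l generalizing ys0 cur with
  | nil => simp [restoreAltGo]
  | cons xi l ih =>
    simp only [List.foldl_cons]
    have hlen : (ys0 ++ [cur]).length ≠ 0 := by simp
    rw [if_neg hlen, pyGet_concat_last]
    simp only [Option.getD_some, List.dropLast_concat]
    by_cases h : PySem.Str.endswith cur "\\" = true
    · rw [if_pos h, ih]
      simp only [restoreAltGo]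
      rw [if_pos h]
    · rw [if_neg h]
      have : ys0 ++ [cur] ++ [xi] = (ys0 ++ [cur]) ++ [xi] := rfl
      rw [this, ih (ys0 ++ [cur]) xi]
      simp only [restoreAltGo, List.append_assoc, List.singleton_append]
      rw [if_neg h]

-- ===== VERDICT (by name: the statement is the Claim_ definition above) =====
theorem restore_args_with_whitespace_spec : Claim_equal_restore_args_with_whitespace := by
  intro x _
  unfold Spec_restore_args_with_whitespace restore_args_with_whitespace restore_args_with_whitespace_alt
  match x with
  | [] => rfl
  | x0 :: xs =>
    simp only [List.foldl_cons, List.length_nil, List.nil_append]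
    exact foldl_step_concat xs [] x0
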